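-- pv_equiv track=rewrite | github.com/obadadallo95/Hydra-Cool | src/engine/hyperscale_study.py | select_failure_mode
-- ===== SOURCE A (Python) =====
-- from typing import Dict, List, Tuple
--
-- def select_failure_mode(issues: List[str]) -> str:
--     priority_order = [
--         "INSUFFICIENT_VELOCITY",
--         "THERMAL_DUTY_UNMET",
--         "EXCESSIVE_VELOCITY",
--         "NO_POSITIVE_RETROFIT_BENEFIT",
--         "LOW_RETROFIT_BENEFIT",
--         "INSUFFICIENT_NATURAL_CIRCULATION",
--         "INVALID_TEMPERATURE_GRADIENT",
--         "INTAKE_TOO_SHORT_FOR_DEPTH",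
--         "INVALID_DELTA_T",
--         "INVALID_PIPE_COUNT",
--     ]
--     for mode in priority_order:
--         if mode in issues:
--             return mode
--     return issues[0] if issues else "UNSPECIFIED_FAIL"
-- ===== SOURCE B (Python) =====
-- from typing import Dict, List, Tuple
--
-- _PRIORITY_ORDER = [
--     "INSUFFICIENT_VELOCITY",
--     "THERMAL_DUTY_UNMET",
--     "EXCESSIVE_VELOCITY",
--     "NO_POSITIVE_RETROFIT_BENEFIT",
--     "LOW_RETROFIT_BENEFIT",
--     "INSUFFICIENT_NATURAL_CIRCULATION",
--     "INVALID_TEMPERATURE_GRADIENT",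
--     "INTAKE_TOO_SHORT_FOR_DEPTH",
--     "INVALID_DELTA_T",
--     "INVALID_PIPE_COUNT",
-- ]
-- _RANK = {mode: i for i, mode in enumerate(_PRIORITY_ORDER)}
--
-- def select_failure_mode(issues: List[str]) -> str:
--     candidates = [x for x in issues if x in _RANK]
--     if candidates:
--         return min(candidates, key=_RANK.__getitem__)
--     return issues[0] if issues else "UNSPECIFIED_FAIL"
-- ===== Notes on version B (the rewrite author's own statement) =====
-- stated objective: idiomatic
-- what changed: Instead of scanning the fixed priority list and testing each mode's membership in issues, B builds a rank index once, iterates over the issues themselves keeping only recognised modes, and reduces them with min keyed by rank.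
import Mathlib
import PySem

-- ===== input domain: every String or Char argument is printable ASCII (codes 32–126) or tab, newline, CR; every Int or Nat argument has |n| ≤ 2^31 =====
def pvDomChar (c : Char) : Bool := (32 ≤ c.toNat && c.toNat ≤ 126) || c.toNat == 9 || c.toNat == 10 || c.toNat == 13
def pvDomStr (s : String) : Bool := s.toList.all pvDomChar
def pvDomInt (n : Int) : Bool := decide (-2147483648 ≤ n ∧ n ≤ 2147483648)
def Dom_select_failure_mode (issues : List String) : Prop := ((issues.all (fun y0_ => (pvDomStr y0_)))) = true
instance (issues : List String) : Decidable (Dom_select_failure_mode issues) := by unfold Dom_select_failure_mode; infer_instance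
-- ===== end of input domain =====

-- B replaces A's scan over the fixed priority list (membership test per mode) by a rank
-- index built once and a min-by-rank reduction over the issues themselves (idiomatic rewrite).

-- ===== PORT A =====
-- the local 'priority_order' list of A
def pvPrio : List String :=
  ["INSUFFICIENT_VELOCITY", "THERMAL_DUTY_UNMET", "EXCESSIVE_VELOCITY",
   "NO_POSITIVE_RETROFIT_BENEFIT", "LOW_RETROFIT_BENEFIT",
   "INSUFFICIENT_NATURAL_CIRCULATION", "INVALID_TEMPERATURE_GRADIENT",
   "INTAKE_TOO_SHORT_FOR_DEPTH", "INVALID_DELTA_T", "INVALID_PIPE_COUNT"]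

-- 'for mode in priority_order: if mode in issues: return mode'
def pvSelLoop : List String → List String → Option String
  | [], _ => none
  | m :: rest, issues => if m ∈ issues then some m else pvSelLoop rest issues

def select_failure_mode (issues : List String) : String :=
  match pvSelLoop pvPrio issues with
  | some m => m
  | none =>
    match issues with
    | [] => "UNSPECIFIED_FAIL"
    | x :: _ => x

-- ===== PORT B =====
-- module-level _PRIORITY_ORDER of Source B
def pvPrioB : List String :=
  ["INSUFFICIENT_VELOCITY", "THERMAL_DUTY_UNMET", "EXCESSIVE_VELOCITY",
   "NO_POSITIVE_RETROFIT_BENEFIT", "LOW_RETROFIT_BENEFIT",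
   "INSUFFICIENT_NATURAL_CIRCULATION", "INVALID_TEMPERATURE_GRADIENT",
   "INTAKE_TOO_SHORT_FOR_DEPTH", "INVALID_DELTA_T", "INVALID_PIPE_COUNT"]

-- _RANK = {mode: i for i, mode in enumerate(_PRIORITY_ORDER)}
def pvRank : PySem.Dict String Int :=
  (PySem.List.enumerate pvPrioB 0).foldl (fun d p => d.insert p.2 p.1) PySem.Dict.empty

def select_failure_mode_alt (issues : List String) : String :=
  -- candidates = [x for x in issues if x in _RANK]; min(candidates, key=_RANK.__getitem__)
  -- (every candidate is a key of _RANK, so the getD default 0 is never consulted);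
  -- 'if candidates:' and the min over the non-empty list are the two arms of the match
  match PySem.List.min? (issues.filter (fun x => pvRank.contains x)) (fun x => pvRank.getD x 0) with
  | some m => m
  | none =>
    match issues with
    | [] => "UNSPECIFIED_FAIL"
    | x :: _ => x

-- ===== PRECONDITION & SPEC =====
def Spec_select_failure_mode (issues : List String) (out : String) : Prop := out = select_failure_mode_alt issues
instance (issues : List String) (out : String) : Decidable (Spec_select_failure_mode issues out) := by unfold Spec_select_failure_mode; infer_instance

-- ===== CLAIM (what is proved, stated in full; the proofs are below) =====
def Claim_equal_select_failure_mode : Prop := ∀ (issues : List String), Dom_select_failure_mode issues → Spec_select_failure_mode issues (select_failure_mode issues)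

-- ===== LEMMAS AND PROOFS =====

lemma pvRank_contains_iff (y : String) : pvRank.contains y = true ↔ y ∈ pvPrioB := by
  rw [PySem.Dict.contains_iff_mem_keys]
  unfold pvRank
  rw [PySem.Dict.keys_foldl_insert_key]
  simp [PySem.Dict.keys_empty, PySem.Set.update_nil_left, PySem.Set.mem_ofList,
    PySem.List.map_snd_enumerate]

lemma pv_min_eq {l : List String} {k : String → Int} {a : String}
    (ha : a ∈ l) (hmin : ∀ y ∈ l, k a ≤ k y) (hinj : ∀ y ∈ l, k y = k a → y = a) :
    PySem.List.min? l k = some a := by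
  cases hm : PySem.List.min? l k with
  | none =>
    rw [PySem.List.min?_eq_none_iff] at hm
    rw [hm] at ha; cases ha
  | some m =>
    have hmem := PySem.List.min?_mem hm
    have h1 := PySem.List.min?_isMin hm a ha
    exact congrArg some (hinj m hmem (le_antisymm h1 (hmin m hmem)))

lemma pvRank_inj : ∀ y ∈ pvPrioB, ∀ a ∈ pvPrioB, pvRank.getD y 0 = pvRank.getD a 0 → y = a := by
  decide

lemma pv_alt_eq (issues : List String) (a : String) (haI : a ∈ issues) (haP : a ∈ pvPrioB)
    (hbest : ∀ y ∈ pvPrioB, y ∈ issues → pvRank.getD a 0 ≤ pvRank.getD y 0) :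
    select_failure_mode_alt issues = a := by
  have hc : a ∈ issues.filter (fun x => pvRank.contains x) :=
    List.mem_filter.mpr ⟨haI, (pvRank_contains_iff a).mpr haP⟩
  unfold select_failure_mode_alt
  rw [pv_min_eq hc
    (fun y hy => hbest y ((pvRank_contains_iff y).mp (List.mem_filter.mp hy).2)
      (List.mem_filter.mp hy).1)
    (fun y hy hk => pvRank_inj y ((pvRank_contains_iff y).mp (List.mem_filter.mp hy).2) a haP hk)]

-- ===== VERDICT (by name: the statement is the Claim_ definition above) =====
theorem select_failure_mode_spec : Claim_equal_select_failure_mode := by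
  intro issues _
  unfold Spec_select_failure_mode
  by_cases h0 : "INSUFFICIENT_VELOCITY" ∈ issues
  · rw [show select_failure_mode issues = "INSUFFICIENT_VELOCITY" by
        simp [select_failure_mode, pvSelLoop, pvPrio, h0],
      pv_alt_eq issues _ h0 (by decide)
        (by intro y hyP hyI; fin_cases hyP <;> decide)]
  · by_cases h1 : "THERMAL_DUTY_UNMET" ∈ issues
    · rw [show select_failure_mode issues = "THERMAL_DUTY_UNMET" by
          simp [select_failure_mode, pvSelLoop, pvPrio, h0, h1],
        pv_alt_eq issues _ h1 (by decide)
          (by intro y hyP hyI; fin_cases hyP <;> first | decide | simp_all)]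
    · by_cases h2 : "EXCESSIVE_VELOCITY" ∈ issues
      · rw [show select_failure_mode issues = "EXCESSIVE_VELOCITY" by
            simp [select_failure_mode, pvSelLoop, pvPrio, h0, h1, h2],
          pv_alt_eq issues _ h2 (by decide)
            (by intro y hyP hyI; fin_cases hyP <;> first | decide | simp_all)]
      · by_cases h3 : "NO_POSITIVE_RETROFIT_BENEFIT" ∈ issues
        · rw [show select_failure_mode issues = "NO_POSITIVE_RETROFIT_BENEFIT" by
              simp [select_failure_mode, pvSelLoop, pvPrio, h0, h1, h2, h3],
            pv_alt_eq issues _ h3 (by decide)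
              (by intro y hyP hyI; fin_cases hyP <;> first | decide | simp_all)]
        · by_cases h4 : "LOW_RETROFIT_BENEFIT" ∈ issues
          · rw [show select_failure_mode issues = "LOW_RETROFIT_BENEFIT" by
                simp [select_failure_mode, pvSelLoop, pvPrio, h0, h1, h2, h3, h4],
              pv_alt_eq issues _ h4 (by decide)
                (by intro y hyP hyI; fin_cases hyP <;> first | decide | simp_all)]
          · by_cases h5 : "INSUFFICIENT_NATURAL_CIRCULATION" ∈ issues
            · rw [show select_failure_mode issues = "INSUFFICIENT_NATURAL_CIRCULATION" by
                  simp [select_failure_mode, pvSelLoop, pvPrio, h0, h1, h2, h3, h4, h5],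
                pv_alt_eq issues _ h5 (by decide)
                  (by intro y hyP hyI; fin_cases hyP <;> first | decide | simp_all)]
            · by_cases h6 : "INVALID_TEMPERATURE_GRADIENT" ∈ issues
              · rw [show select_failure_mode issues = "INVALID_TEMPERATURE_GRADIENT" by
                    simp [select_failure_mode, pvSelLoop, pvPrio, h0, h1, h2, h3, h4, h5, h6],
                  pv_alt_eq issues _ h6 (by decide)
                    (by intro y hyP hyI; fin_cases hyP <;> first | decide | simp_all)]
              · by_cases h7 : "INTAKE_TOO_SHORT_FOR_DEPTH" ∈ issues
                · rw [show select_failure_mode issues = "INTAKE_TOO_SHORT_FOR_DEPTH" by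
                      simp [select_failure_mode, pvSelLoop, pvPrio, h0, h1, h2, h3, h4, h5, h6, h7],
                    pv_alt_eq issues _ h7 (by decide)
                      (by intro y hyP hyI; fin_cases hyP <;> first | decide | simp_all)]
                · by_cases h8 : "INVALID_DELTA_T" ∈ issues
                  · rw [show select_failure_mode issues = "INVALID_DELTA_T" by
                        simp [select_failure_mode, pvSelLoop, pvPrio, h0, h1, h2, h3, h4, h5, h6, h7, h8],
                      pv_alt_eq issues _ h8 (by decide)
                        (by intro y hyP hyI; fin_cases hyP <;> first | decide | simp_all)]
                  · by_cases h9 : "INVALID_PIPE_COUNT" ∈ issues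
                    · rw [show select_failure_mode issues = "INVALID_PIPE_COUNT" by
                          simp [select_failure_mode, pvSelLoop, pvPrio, h0, h1, h2, h3, h4, h5, h6, h7, h8, h9],
                        pv_alt_eq issues _ h9 (by decide)
                          (by intro y hyP hyI; fin_cases hyP <;> first | decide | simp_all)]
                    · have hf : issues.filter (fun x => pvRank.contains x) = [] := by
                        rw [List.filter_eq_nil_iff]
                        intro y hy hcy
                        have : y ∈ pvPrioB := (pvRank_contains_iff y).mp hcy
                        fin_cases this <;> simp_all
                      have hA : pvSelLoop pvPrio issues = none := by
                        simp [pvSelLoop, pvPrio, h0, h1, h2, h3, h4, h5, h6, h7, h8, h9]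
                      unfold select_failure_mode select_failure_mode_alt
                      simp [hA, hf, PySem.List.min?]
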